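-- pv_equiv track=rewrite | github.com/juanrobayo97/Proyecto1 | main.py | panprimo
-- ===== SOURCE A (Python) =====
-- def panprimo (n):
--     contador = 0
--     for i in range (1,(n % 1000)+1):
--         if ((n % 1000) % i == 0):
--             contador +=1
--     if contador > 2:
--         return False
--     cadena = str(n)
--     for i in range (0,10):
--         a = str(i)
--         if a not in cadena:
--             return False
--     return True
-- ===== SOURCE B (Python) =====
-- def panprimo(n):
--     m = n % 1000
--     i = 2
--     while i * i <= m:
--         if m % i == 0:
--             return False
--         i += 1
--     return set('0123456789') <= set(str(n))
-- ===== Notes on version B (the rewrite author's own statement) =====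
-- stated objective: faster
-- what changed: A counts all divisors of m = n % 1000 by scanning range(1, m+1); B instead trial-divides only up to sqrt(m) with early exit, and replaces the ten per-digit substring scans by a single set-inclusion check.
import Mathlib
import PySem

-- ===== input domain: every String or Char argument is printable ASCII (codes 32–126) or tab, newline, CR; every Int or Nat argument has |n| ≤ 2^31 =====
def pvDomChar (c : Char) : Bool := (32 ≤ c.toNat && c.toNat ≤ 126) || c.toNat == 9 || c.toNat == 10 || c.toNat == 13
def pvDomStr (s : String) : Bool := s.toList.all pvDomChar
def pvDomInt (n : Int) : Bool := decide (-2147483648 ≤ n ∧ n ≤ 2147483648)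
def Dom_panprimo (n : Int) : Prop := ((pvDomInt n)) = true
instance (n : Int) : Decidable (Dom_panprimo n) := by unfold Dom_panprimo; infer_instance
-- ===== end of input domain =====

-- B replaces A's full divisor-counting loop over range(1, n%1000+1) by a √-bounded
-- trial-division test with early exit, and the digit-by-digit substring loop by one
-- set-inclusion check (objective: faster, O(√m) vs O(m) on the modulus part).

-- ===== PORT A =====
def panprimo (n : Int) : Bool :=
  let contador : Int :=
    (PySem.List.pyRange 1 (PySem.Int.mod n 1000 + 1) 1).foldl
      (fun contador i =>
        if PySem.Int.mod (PySem.Int.mod n 1000) i == 0 then contador + 1 else contador) 0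
  if contador > 2 then false
  else
    let cadena := PySem.Int.toChars n
    (PySem.List.pyRange 0 10 1).all (fun i => PySem.Chars.isIn (PySem.Int.toChars i) cadena)

-- ===== PORT B =====
-- the 'while i * i <= m' loop of Source B; fuel is only a totality device (m.toNat + 1
-- steps always suffice for the loop to stop by its own condition)
def panprimoAltLoop (fuel : Nat) (m i : Int) : Bool :=
  match fuel with
  | 0 => false
  | fuel + 1 =>
    if i * i ≤ m then
      if PySem.Int.mod m i == 0 then true
      else panprimoAltLoop fuel m (i + 1)
    else false

def panprimo_alt (n : Int) : Bool :=
  let m := PySem.Int.mod n 1000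
  if panprimoAltLoop (m.toNat + 1) m 2 then false
  else PySem.Set.issubset (PySem.Set.ofList "0123456789".toList)
         (PySem.Set.ofList (PySem.Int.toChars n))

-- ===== PRECONDITION & SPEC =====
def Spec_panprimo (n : Int) (out : Bool) : Prop := out = panprimo_alt n
instance (n : Int) (out : Bool) : Decidable (Spec_panprimo n out) := by unfold Spec_panprimo; infer_instance

-- ===== CLAIM (what is proved, stated in full; the proofs are below) =====
def Claim_equal_panprimo : Prop := ∀ (n : Int), Dom_panprimo n → Spec_panprimo n (panprimo n)

-- ===== LEMMAS AND PROOFS =====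

-- B's loop decides "m has a divisor j with i <= j and j*j <= m", given enough fuel
lemma altLoop_iff (fuel : Nat) : ∀ (m i : Int), 0 ≤ i →
    (∃ k : Nat, k < fuel ∧ m < (i + k) * (i + k)) →
    (panprimoAltLoop fuel m i = true ↔ ∃ j : Int, i ≤ j ∧ j * j ≤ m ∧ j ∣ m) := by
  induction fuel with
  | zero => intro m i _ ⟨k, hk, _⟩; omega
  | succ fuel ih =>
    intro m i hi ⟨k, hk, hkm⟩
    unfold panprimoAltLoop
    by_cases h : i * i ≤ m
    · rw [if_pos h]
      by_cases hd : PySem.Int.mod m i == 0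
      · simp only [hd, if_pos]
        constructor
        · intro _; exact ⟨i, le_refl i, h, (PySem.Int.mod_eq_zero_iff_dvd m i).mp (by simpa using hd)⟩
        · intro _; trivial
      · rw [if_neg (by simpa using hd)]
        have hknz : k ≠ 0 := by
          rintro rfl; simp at hkm; omega
        have hrec := ih m (i + 1) (by omega) ⟨k - 1, by omega, by
          have : (i + 1 + (k - 1 : Nat) : Int) = i + k := by omega
          rw [this]; exact hkm⟩
        rw [hrec]
        have hnd : ¬ i ∣ m := by
          intro hdvd
          have : (PySem.Int.mod m i == 0) = true := by
            simpa using (PySem.Int.mod_eq_zero_iff_dvd m i).mpr hdvd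
          simp [this] at hd
        constructor
        · rintro ⟨j, hj1, hj2, hj3⟩; exact ⟨j, by omega, hj2, hj3⟩
        · rintro ⟨j, hj1, hj2, hj3⟩
          refine ⟨j, ?_, hj2, hj3⟩
          rcases eq_or_lt_of_le hj1 with rfl | hlt
          · exact absurd hj3 hnd
          · omega
    · rw [if_neg h]
      constructor
      · intro hh; exact absurd hh (by simp)
      · rintro ⟨j, hj1, hj2, _⟩
        exact absurd hj2 (by nlinarith)

-- A's divisor count exceeds 2 iff m has a proper divisor strictly between 1 and m
lemma aCount_iff (m : Int) (hm : 0 ≤ m) :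
    (2 < (PySem.List.pyRange 1 (m + 1) 1).foldl
      (fun contador i => if PySem.Int.mod m i == 0 then contador + 1 else contador) (0 : Int))
    ↔ ∃ i : Int, 2 ≤ i ∧ i < m ∧ i ∣ m := by
  rw [PySem.List.foldl_count_if]
  rcases lt_or_ge m 2 with h2 | h2
  · interval_cases m
    · constructor
      · intro h; exfalso; revert h; decide
      · rintro ⟨i, h1, hlt, _⟩; omega
    · constructor
      · intro h; exfalso; revert h; decide
      · rintro ⟨i, h1, hlt, _⟩; omega
  · have hsplit : PySem.List.pyRange 1 (m + 1) 1
        = [1] ++ PySem.List.pyRange 2 m 1 ++ [m] := by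
      rw [PySem.List.pyRange_one_append 1 2 (m+1) (by omega) (by omega),
          PySem.List.pyRange_one_append 2 m (m+1) (by omega) (by omega),
          show PySem.List.pyRange m (m+1) 1 = [m] from PySem.List.pyRange_one_singleton m,
          show PySem.List.pyRange 1 2 1 = [1] by decide]
      simp
    rw [hsplit]
    simp only [List.countP_append]
    set c := List.countP (fun i => PySem.Int.mod m i == 0) (PySem.List.pyRange 2 m 1) with hc
    have c1 : List.countP (fun i => PySem.Int.mod m i == 0) [1] = 1 := by
      simp [List.countP, List.countP.go]
    have cm : List.countP (fun i => PySem.Int.mod m i == 0) [m] = 1 := by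
      have hmm : PySem.Int.mod m m = 0 := (PySem.Int.mod_eq_zero_iff_dvd m m).mpr dvd_rfl
      simp [List.countP, List.countP.go, hmm]
    rw [c1, cm]
    have key : ((2:Int) < 0 + ↑(1 + c + 1)) ↔ 0 < c := by push_cast; omega
    rw [key, List.countP_pos_iff]
    constructor
    · rintro ⟨i, hmem, hp⟩
      rw [PySem.List.mem_pyRange_one] at hmem
      exact ⟨i, hmem.1, hmem.2, (PySem.Int.mod_eq_zero_iff_dvd m i).mp (by simpa using hp)⟩
    · rintro ⟨i, h1, hlt, hdvd⟩
      exact ⟨i, PySem.List.mem_pyRange_one.mpr ⟨h1, hlt⟩, by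
        simpa using (PySem.Int.mod_eq_zero_iff_dvd m i).mpr hdvd⟩

-- proper divisor below m iff divisor below the square root (via Nat.prime_def_lt / Nat.prime_def_le_sqrt)
lemma link_nat (M : Nat) :
    (∃ i : Nat, 2 ≤ i ∧ i < M ∧ i ∣ M) ↔ (∃ j : Nat, 2 ≤ j ∧ j * j ≤ M ∧ j ∣ M) := by
  rcases lt_or_ge M 2 with h2 | h2
  · constructor
    · rintro ⟨i, h1, hlt, _⟩; omega
    · rintro ⟨j, h1, hle, _⟩; exfalso; nlinarith
  · constructor
    · rintro ⟨i, h1, hlt, hdvd⟩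
      have hprime : ¬ Nat.Prime M := by
        rw [Nat.prime_def_lt]
        push Not
        intro _
        exact ⟨i, hlt, hdvd, by omega⟩
      rw [Nat.prime_def_le_sqrt] at hprime
      push Not at hprime
      obtain ⟨j, hj1, hj2, hj3⟩ := hprime h2
      exact ⟨j, hj1, Nat.le_sqrt.mp hj2, hj3⟩
    · rintro ⟨j, h1, hle, hdvd⟩
      have hprime : ¬ Nat.Prime M := by
        rw [Nat.prime_def_le_sqrt]
        push Not
        intro _
        exact ⟨j, h1, Nat.le_sqrt.mpr hle, hdvd⟩
      rw [Nat.prime_def_lt] at hprime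
      push Not at hprime
      obtain ⟨i, hlt, hdvd', hne⟩ := hprime h2
      have hi0 : i ≠ 0 := by rintro rfl; rw [Nat.zero_dvd] at hdvd'; omega
      exact ⟨i, by omega, hlt, hdvd'⟩

lemma link_int (m : Int) (hm : 0 ≤ m) :
    (∃ i : Int, 2 ≤ i ∧ i < m ∧ i ∣ m) ↔ (∃ j : Int, 2 ≤ j ∧ j * j ≤ m ∧ j ∣ m) := by
  have hnat := link_nat m.toNat
  constructor
  · rintro ⟨i, h1, hlt, hdvd⟩
    obtain ⟨j, hj1, hj2, hj3⟩ := hnat.mp ⟨i.toNat, by omega, by omega, by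
      rw [← Int.natCast_dvd_natCast]; simpa [Int.toNat_of_nonneg (by omega : (0:Int) ≤ i), Int.toNat_of_nonneg hm] using hdvd⟩
    refine ⟨(j : Int), by omega, ?_, ?_⟩
    · omega
    · have := Int.natCast_dvd_natCast.mpr hj3
      simpa [Int.toNat_of_nonneg hm] using this
  · rintro ⟨j, h1, hle, hdvd⟩
    obtain ⟨i, hi1, hi2, hi3⟩ := hnat.mpr ⟨j.toNat, by omega, by
      have hj0 : 0 ≤ j := by omega
      have : (j.toNat : Int) * (j.toNat : Int) ≤ (m.toNat : Int) := by
        rw [Int.toNat_of_nonneg hj0, Int.toNat_of_nonneg hm]; exact hle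
      exact_mod_cast this, by
      rw [← Int.natCast_dvd_natCast]; simpa [Int.toNat_of_nonneg (by omega : (0:Int) ≤ j), Int.toNat_of_nonneg hm] using hdvd⟩
    refine ⟨(i : Int), by omega, by omega, ?_⟩
    have := Int.natCast_dvd_natCast.mpr hi3
    simpa [Int.toNat_of_nonneg hm] using this

-- A's 10-substring loop equals B's set inclusion
lemma digits_eq (cadena : List Char) :
    ((PySem.List.pyRange 0 10 1).all (fun i => PySem.Chars.isIn (PySem.Int.toChars i) cadena))
    = PySem.Set.issubset (PySem.Set.ofList "0123456789".toList) (PySem.Set.ofList cadena) := by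
  have hr : PySem.List.pyRange 0 10 1 = [0,1,2,3,4,5,6,7,8,9] := by decide
  have hs : "0123456789".toList = ['0','1','2','3','4','5','6','7','8','9'] := by decide
  rw [Bool.eq_iff_iff, hr]
  simp only [List.all_cons, List.all_nil, Bool.and_eq_true,
    PySem.Chars.isIn_iff_infix, List.singleton_infix_iff,
    PySem.Set.issubset_iff, PySem.Set.mem_ofList, hs,
    show PySem.Int.toChars 0 = ['0'] from rfl, show PySem.Int.toChars 1 = ['1'] from rfl,
    show PySem.Int.toChars 2 = ['2'] from rfl, show PySem.Int.toChars 3 = ['3'] from rfl,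
    show PySem.Int.toChars 4 = ['4'] from rfl, show PySem.Int.toChars 5 = ['5'] from rfl,
    show PySem.Int.toChars 6 = ['6'] from rfl, show PySem.Int.toChars 7 = ['7'] from rfl,
    show PySem.Int.toChars 8 = ['8'] from rfl, show PySem.Int.toChars 9 = ['9'] from rfl]
  constructor
  · rintro ⟨h0,h1,h2,h3,h4,h5,h6,h7,h8,h9,-⟩ x hx
    fin_cases hx <;> assumption
  · intro h
    refine ⟨?_,?_,?_,?_,?_,?_,?_,?_,?_,?_,trivial⟩ <;> exact h _ (by simp)

-- ===== VERDICT (by name: the statement is the Claim_ definition above) =====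
theorem panprimo_spec : Claim_equal_panprimo := by
  intro n _
  unfold Spec_panprimo panprimo panprimo_alt
  set m := PySem.Int.mod n 1000 with hmdef
  have hm : 0 ≤ m := PySem.Int.mod_nonneg n (by norm_num)
  have hcond : (2 < (PySem.List.pyRange 1 (m + 1) 1).foldl
      (fun contador i => if PySem.Int.mod m i == 0 then contador + 1 else contador) (0 : Int))
      ↔ (panprimoAltLoop (m.toNat + 1) m 2 = true) := by
    rw [aCount_iff m hm, link_int m hm,
        altLoop_iff (m.toNat + 1) m 2 (by norm_num) ⟨m.toNat, by omega, by nlinarith [Int.toNat_of_nonneg hm]⟩]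
  simp only []
  rw [digits_eq]
  by_cases h : panprimoAltLoop (m.toNat + 1) m 2 = true
  · rw [if_pos (hcond.mpr h), if_pos h]
  · rw [if_neg (fun hh => h (hcond.mp hh)), if_neg h]
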